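-- pv_equiv track=rewrite | github.com/MarcosGuerreroA/DataLog | LogData.py | GetIndexDepthImage
-- ===== SOURCE A (Python) =====
-- def GetIndexDepthImage(top_depth, bottom_depth):
--     ListDepths = list()
--     ControlDepth = 0
--
--     while True:
--         if ControlDepth < bottom_depth:
--             if len(ListDepths) <= 0:
--                 ListDepths.append(top_depth)
--                 ControlDepth = top_depth
--             else:
--                 ControlDepth += 1000
--                 ListDepths.append(ControlDepth)
--         else:
--             break
--     return ListDepths
-- ===== SOURCE B (Python) =====
-- def GetIndexDepthImage(top_depth, bottom_depth):
--     if bottom_depth <= 0: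
--         return []
--     n = 1 + max(0, -((top_depth - bottom_depth) // 1000))
--     return [top_depth + 1000 * k for k in range(n)]
-- ===== Notes on version B (the rewrite author's own statement) =====
-- stated objective: simpler
-- what changed: B replaces A's sentinel-initialized while-True loop (growing the list while a running control value stays below bottom_depth) by a closed-form element count via ceiling division and a single range comprehension.
import Mathlib
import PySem

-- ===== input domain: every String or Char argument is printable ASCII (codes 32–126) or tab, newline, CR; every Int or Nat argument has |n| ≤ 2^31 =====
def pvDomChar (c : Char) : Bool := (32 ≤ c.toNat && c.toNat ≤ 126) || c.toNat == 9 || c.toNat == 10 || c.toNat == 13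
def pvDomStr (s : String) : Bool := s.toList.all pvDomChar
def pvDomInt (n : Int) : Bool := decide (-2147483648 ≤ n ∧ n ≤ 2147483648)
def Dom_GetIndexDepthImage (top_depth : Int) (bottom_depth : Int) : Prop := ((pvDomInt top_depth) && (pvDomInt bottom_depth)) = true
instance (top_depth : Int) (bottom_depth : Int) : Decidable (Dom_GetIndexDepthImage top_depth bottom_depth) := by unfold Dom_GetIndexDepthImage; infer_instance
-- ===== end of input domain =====

-- B replaces A's sentinel-driven while-loop by a closed-form element count plus a range comprehension (objective: simpler).

-- ===== PORT A =====
-- the 'while True' loop; state = (ListDepths, ControlDepth)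
def GetIndexDepthImageLoop (top_depth : Int) (bottom_depth : Int)
    (ListDepths : List Int) (ControlDepth : Int) : List Int :=
  if ControlDepth < bottom_depth then
    if ListDepths.length ≤ 0 then
      GetIndexDepthImageLoop top_depth bottom_depth (ListDepths ++ [top_depth]) top_depth
    else
      GetIndexDepthImageLoop top_depth bottom_depth (ListDepths ++ [ControlDepth + 1000]) (ControlDepth + 1000)
  else ListDepths
termination_by (bottom_depth - ControlDepth).toNat +
  (if ListDepths.length ≤ 0 then (bottom_depth - top_depth).toNat + 1 else 0)
decreasing_by
  all_goals
    simp only [List.length_append, List.length_cons, List.length_nil]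
    split_ifs <;> omega

def GetIndexDepthImage (top_depth : Int) (bottom_depth : Int) : List Int :=
  GetIndexDepthImageLoop top_depth bottom_depth [] 0

-- ===== PORT B =====
def GetIndexDepthImage_alt (top_depth : Int) (bottom_depth : Int) : List Int :=
  if bottom_depth ≤ 0 then []
  else
    let n := 1 + max 0 (-(PySem.Int.floordiv (top_depth - bottom_depth) 1000))
    (PySem.List.pyRange 0 n 1).map (fun k => top_depth + 1000 * k)

-- ===== PRECONDITION & SPEC =====
def Spec_GetIndexDepthImage (top_depth : Int) (bottom_depth : Int) (out : List Int) : Prop := out = GetIndexDepthImage_alt top_depth bottom_depth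
instance (top_depth : Int) (bottom_depth : Int) (out : List Int) : Decidable (Spec_GetIndexDepthImage top_depth bottom_depth out) := by unfold Spec_GetIndexDepthImage; infer_instance

-- ===== CLAIM (what is proved, stated in full; the proofs are below) =====
def Claim_equal_GetIndexDepthImage : Prop := ∀ (top_depth : Int) (bottom_depth : Int), Dom_GetIndexDepthImage top_depth bottom_depth → Spec_GetIndexDepthImage top_depth bottom_depth (GetIndexDepthImage top_depth bottom_depth)

-- ===== LEMMAS AND PROOFS =====

-- the sequence appended by A's loop after the first element is in place
def tailSeq (b : Int) (c : Int) : List Int :=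
  if c < b then (c + 1000) :: tailSeq b (c + 1000) else []
termination_by (b - c).toNat
decreasing_by omega

theorem loop_eq_tailSeq (t b c : Int) (lst : List Int) (h : lst ≠ []) :
    GetIndexDepthImageLoop t b lst c = lst ++ tailSeq b c := by
  rw [GetIndexDepthImageLoop, tailSeq]
  split
  · next hc =>
    have hlen : ¬ lst.length ≤ 0 := by
      simpa [Nat.le_zero, List.length_eq_zero_iff] using h
    rw [if_neg hlen, loop_eq_tailSeq t b (c + 1000) (lst ++ [c + 1000]) (by simp)]
    simp
  · simp
termination_by (b - c).toNat
decreasing_by omega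

-- the ceiling count satisfies the expected bracket
theorem ceil_bracket (a : Int) :
    (-(PySem.Int.floordiv (-a) 1000) - 1) * 1000 < a ∧ a ≤ -(PySem.Int.floordiv (-a) 1000) * 1000 := by
  have := (PySem.Int.neg_floordiv_neg_eq_iff_of_pos (a := a) (b := 1000)
    (q := -(PySem.Int.floordiv (-a) 1000)) (by norm_num)).mp rfl
  omega

theorem tailSeq_eq (b c : Int) :
    tailSeq b c = (List.range (max 0 (-(PySem.Int.floordiv (c - b) 1000))).toNat).map
      (fun (k : Nat) => c + 1000 * ((k : Int) + 1)) := by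
  rw [tailSeq]
  have hb := ceil_bracket (b - c)
  have hneg : -(b - c) = c - b := by ring
  rw [hneg] at hb
  split
  · next hc =>
    have hb' := ceil_bracket (b - (c + 1000))
    have hneg' : -(b - (c + 1000)) = (c + 1000) - b := by ring
    rw [hneg'] at hb'
    set q := -(PySem.Int.floordiv (c - b) 1000) with hq
    set q' := -(PySem.Int.floordiv ((c + 1000) - b) 1000) with hq'
    have hqq : q = q' + 1 := by omega
    have hq1 : 1 ≤ q := by nlinarith [hb.2]
    rw [tailSeq_eq b (c + 1000)]
    have hm : (max 0 q).toNat = (max 0 q').toNat + 1 := by omega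
    rw [hm, List.range_succ_eq_map]
    simp only [List.map_cons, List.map_map]
    refine List.cons_eq_cons.mpr ⟨by push_cast; ring, ?_⟩
    apply List.map_congr_left
    intro k _
    simp only [Function.comp_apply]
    push_cast
    ring
  · next hc =>
    have : max 0 (-(PySem.Int.floordiv (c - b) 1000)) = 0 := by omega
    rw [this]
    simp
termination_by (b - c).toNat
decreasing_by omega

-- ===== VERDICT (by name: the statement is the Claim_ definition above) =====
theorem GetIndexDepthImage_spec : Claim_equal_GetIndexDepthImage := by
  intro t b _
  unfold Spec_GetIndexDepthImage GetIndexDepthImage GetIndexDepthImage_alt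
  rw [GetIndexDepthImageLoop]
  by_cases hb : b ≤ 0
  · rw [if_neg (by omega), if_pos hb]
  · rw [if_pos (by omega), if_neg hb]
    simp only [List.length_nil, Nat.le_refl, if_pos, List.nil_append]
    rw [loop_eq_tailSeq t b t [t] (by simp), tailSeq_eq]
    rw [PySem.List.pyRange_one]
    have hn : (1 + max 0 (-(PySem.Int.floordiv (t - b) 1000)) - 0).toNat
        = (max 0 (-(PySem.Int.floordiv (t - b) 1000))).toNat + 1 := by
      have := ceil_bracket (b - t)
      have hneg : -(b - t) = t - b := by ring
      rw [hneg] at this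
      omega
    rw [hn, List.range_succ_eq_map]
    simp only [List.map_cons, List.map_map, List.singleton_append]
    refine List.cons_eq_cons.mpr ⟨by push_cast; ring, ?_⟩
    apply List.map_congr_left
    intro k _
    simp only [Function.comp_apply]
    push_cast
    ring
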